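-- pv_equiv track=rewrite | github.com/marcosroriz/leetcode | 00661_imgsmoother/main.py | matrix_smooth
-- ===== SOURCE A (Python) =====
-- from math import floor
-- from typing import List
--
-- def matrix_smooth(img: List[List[int]], num_rows, num_columns) -> List[List[int]]:
--     pad_img = [[0 for _ in range(num_columns + 2)]
--                for _ in range(num_rows + 2)]
--     result = [[0 for _ in range(num_columns)] for _ in range(num_rows)]
--
--     for i in range(num_rows):
--         for j in range(num_columns):
--             pad_img[i+1][j+1] = img[i][j]
--
--     for i in range(1, num_rows + 1):
--         for j in range(1, num_columns + 1):
--             line_top = sum(pad_img[i - 1][j - 1:j + 2])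
--             line_median = sum(pad_img[i][j - 1:j + 2])
--             line_bottom = sum(pad_img[i+1][j - 1:j + 2])
--             elem = line_top + line_median + line_bottom
--
--             div = 9
--             if ((i == 1 and j == 1) or (i == 1 and j == num_columns) or
--                     (i == num_rows and j == 1) or (i == num_rows and j == num_columns)):
--                 div = 4
--             elif (i == 1) or (i == num_rows) or (j == 1) or (j == num_columns):
--                 div = 6
--
--             result[i-1][j-1] = floor(elem / div)
--
--     return result
-- ===== SOURCE B (Python) =====
-- def matrix_smooth(img, num_rows, num_columns):
--     result = []
--     for i in range(num_rows):
--         row = []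
--         for j in range(num_columns):
--             total = 0
--             for di in (-1, 0, 1):
--                 for dj in (-1, 0, 1):
--                     ii = i + di
--                     jj = j + dj
--                     if 0 <= ii < num_rows and 0 <= jj < num_columns:
--                         total += img[ii][jj]
--             rowf = 2 if (i == 0 or i == num_rows - 1) else 3
--             colf = 2 if (j == 0 or j == num_columns - 1) else 3
--             row.append(total // (rowf * colf))
--         result.append(row)
--     return result
-- ===== Notes on version B (the rewrite author's own statement) =====
-- stated objective: simpler
-- what changed: B drops A's zero-padded auxiliary matrix and in-place index assignments: it builds each output row directly in one pass, summing only in-bounds neighbors via di,dj offsets with bounds checks and computing the divisor as a product of row/column edge factors (2 or 3) instead of A's 4/6/9 case analysis.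
import Mathlib
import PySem

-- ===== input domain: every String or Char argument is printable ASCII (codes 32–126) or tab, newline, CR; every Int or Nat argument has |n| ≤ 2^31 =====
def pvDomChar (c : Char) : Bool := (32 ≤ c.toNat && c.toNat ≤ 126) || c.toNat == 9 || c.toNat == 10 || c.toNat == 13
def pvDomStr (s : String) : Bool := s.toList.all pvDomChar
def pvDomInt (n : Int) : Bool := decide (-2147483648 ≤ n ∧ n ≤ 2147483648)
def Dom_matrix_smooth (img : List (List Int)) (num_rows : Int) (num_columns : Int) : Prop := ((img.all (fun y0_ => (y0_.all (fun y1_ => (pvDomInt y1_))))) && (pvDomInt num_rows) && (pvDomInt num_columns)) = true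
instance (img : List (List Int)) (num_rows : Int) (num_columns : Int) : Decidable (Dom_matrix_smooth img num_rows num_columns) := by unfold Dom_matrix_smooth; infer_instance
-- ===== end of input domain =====

-- B removes A's zero-padded matrix: one direct pass summing in-bounds neighbors, divisor as a product of edge factors (objective: simpler).

-- ===== PORT A =====
-- Python's statement 'P[a][b] = v' on a list of fresh row lists
def pySet2 (P : List (List Int)) (a b : Int) (v : Int) : List (List Int) :=
  PySem.List.pySetD P a (PySem.List.pySetD (PySem.List.pyGetD P a []) b v)

-- floor(elem / div) is ported as integer floor division: on Dom |elem| ≤ 9·2^31 ≪ 2^53 and elem/div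
-- (div ∈ {4,6,9}) is at least 1/9 away from any integer it does not equal, so the float floor is exact.
def matrix_smooth (img : List (List Int)) (num_rows : Int) (num_columns : Int) : List (List Int) :=
  let pad0 := (PySem.List.pyRange 0 (num_rows + 2) 1).map
      (fun _ => (PySem.List.pyRange 0 (num_columns + 2) 1).map (fun _ => (0 : Int)))
  let result0 := (PySem.List.pyRange 0 num_rows 1).map
      (fun _ => (PySem.List.pyRange 0 num_columns 1).map (fun _ => (0 : Int)))
  let pad := (PySem.List.pyRange 0 num_rows 1).foldl (fun P i =>
      (PySem.List.pyRange 0 num_columns 1).foldl (fun P j =>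
        pySet2 P (i + 1) (j + 1) (PySem.List.pyGetD (PySem.List.pyGetD img i []) j 0)) P) pad0
  (PySem.List.pyRange 1 (num_rows + 1) 1).foldl (fun R i =>
      (PySem.List.pyRange 1 (num_columns + 1) 1).foldl (fun R j =>
        let line_top := (PySem.List.slice (PySem.List.pyGetD pad (i - 1) []) (some (j - 1)) (some (j + 2))).sum
        let line_median := (PySem.List.slice (PySem.List.pyGetD pad i []) (some (j - 1)) (some (j + 2))).sum
        let line_bottom := (PySem.List.slice (PySem.List.pyGetD pad (i + 1) []) (some (j - 1)) (some (j + 2))).sum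
        let elem := line_top + line_median + line_bottom
        let dv : Int :=
          if ((i = 1 ∧ j = 1) ∨ (i = 1 ∧ j = num_columns) ∨
              (i = num_rows ∧ j = 1) ∨ (i = num_rows ∧ j = num_columns)) then 4
          else if (i = 1 ∨ i = num_rows ∨ j = 1 ∨ j = num_columns) then 6
          else 9
        pySet2 R (i - 1) (j - 1) (PySem.Int.floordiv elem dv)) R) result0

-- ===== PORT B =====
def matrix_smooth_alt (img : List (List Int)) (num_rows : Int) (num_columns : Int) : List (List Int) :=
  (PySem.List.pyRange 0 num_rows 1).foldl (fun result i =>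
    result ++ [(PySem.List.pyRange 0 num_columns 1).foldl (fun row j =>
      let total := ([(-1 : Int), 0, 1]).foldl (fun t di =>
          ([(-1 : Int), 0, 1]).foldl (fun t dj =>
            let ii := i + di
            let jj := j + dj
            if 0 ≤ ii ∧ ii < num_rows ∧ 0 ≤ jj ∧ jj < num_columns then
              t + PySem.List.pyGetD (PySem.List.pyGetD img ii []) jj 0
            else t) t) 0
      let rowf : Int := if i = 0 ∨ i = num_rows - 1 then 2 else 3
      let colf : Int := if j = 0 ∨ j = num_columns - 1 then 2 else 3
      row ++ [PySem.Int.floordiv total (rowf * colf)]) []]) []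

-- ===== PRECONDITION & SPEC =====
-- Pre_ excludes exactly the inputs where A raises IndexError: both loop counts positive but img
-- has fewer than num_rows rows, or one of the first num_rows rows is shorter than num_columns.
def Pre_matrix_smooth (img : List (List Int)) (num_rows : Int) (num_columns : Int) : Prop :=
  num_rows ≤ 0 ∨ num_columns ≤ 0 ∨
  (num_rows ≤ (img.length : Int) ∧
    ∀ row ∈ img.take num_rows.toNat, num_columns ≤ (row.length : Int))
instance (img : List (List Int)) (num_rows : Int) (num_columns : Int) : Decidable (Pre_matrix_smooth img num_rows num_columns) := by unfold Pre_matrix_smooth; infer_instance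

def pvWitness_matrix_smooth : List (List Int) × Int × Int := ([[1, 2], [3, 4]], 2, 2)

def Spec_matrix_smooth (img : List (List Int)) (num_rows : Int) (num_columns : Int) (out : List (List Int)) : Prop := out = matrix_smooth_alt img num_rows num_columns
instance (img : List (List Int)) (num_rows : Int) (num_columns : Int) (out : List (List Int)) : Decidable (Spec_matrix_smooth img num_rows num_columns out) := by unfold Spec_matrix_smooth; infer_instance

-- ===== CLAIM (what is proved, stated in full; the proofs are below) =====
def Claim_equal_matrix_smooth : Prop := ∀ (img : List (List Int)) (num_rows : Int) (num_columns : Int), Dom_matrix_smooth img num_rows num_columns → Pre_matrix_smooth img num_rows num_columns → Spec_matrix_smooth img num_rows num_columns (matrix_smooth img num_rows num_columns)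

-- ===== LEMMAS AND PROOFS =====

-- a num_rows × num_columns matrix given by an entry function
def pvGrid (nR nC : Int) (F : Int → Int → Int) : List (List Int) :=
  (PySem.List.pyRange 0 nR 1).map (fun a => (PySem.List.pyRange 0 nC 1).map (fun b => F a b))

theorem pvSet_map_pyRange {α : Type} (n r : Int) (f : Int → α) (v : α) (h0 : 0 ≤ r) :
    ((PySem.List.pyRange 0 n 1).map f).set r.toNat v
      = (PySem.List.pyRange 0 n 1).map (fun a => if a = r then v else f a) := by
  apply List.ext_getElem
  · simp
  · intro m hm1 hm2
    simp only [List.length_set, List.length_map, PySem.List.length_pyRange_one] at hm1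
    rw [List.getElem_set]
    simp only [List.getElem_map, PySem.List.getElem_pyRange_one]
    split_ifs with h1 h2 h2 <;> first | rfl | omega

theorem pvSet2_grid {nR nC r c : Int} {F : Int → Int → Int} (v : Int)
    (hr0 : 0 ≤ r) (hr : r < nR) (hc0 : 0 ≤ c) :
    pySet2 (pvGrid nR nC F) r c v
      = pvGrid nR nC (fun a b => if a = r ∧ b = c then v else F a b) := by
  unfold pySet2 pvGrid
  rw [PySem.List.pyGetD_map_pyRange_of_nonneg _ nR r [] hr0 hr]
  rw [PySem.List.pySetD_of_nonneg _ v hc0, pvSet_map_pyRange nC c _ v hc0]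
  rw [PySem.List.pySetD_of_nonneg _ _ hr0, pvSet_map_pyRange nR r _ _ hr0]
  congr 1
  funext a
  by_cases ha : a = r
  · subst ha
    rw [if_pos rfl]
    apply List.map_congr_left
    intro b hb
    by_cases hbc : b = c <;> simp [hbc]
  · simp only [if_neg ha]
    apply List.map_congr_left
    intro b hb
    simp [ha]

theorem pvGrid_congr {nR nC : Int} {F G : Int → Int → Int}
    (h : ∀ a b, 0 ≤ a → a < nR → 0 ≤ b → b < nC → F a b = G a b) :
    pvGrid nR nC F = pvGrid nR nC G := by
  unfold pvGrid
  apply List.map_congr_left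
  intro a ha
  rw [PySem.List.mem_pyRange_one] at ha
  apply List.map_congr_left
  intro b hb
  rw [PySem.List.mem_pyRange_one] at hb
  exact h a b ha.1 ha.2 hb.1 hb.2

theorem pvGetD_grid {nR nC : Int} {F : Int → Int → Int} {a : Int} (h0 : 0 ≤ a) (h : a < nR) (d : List Int) :
    PySem.List.pyGetD (pvGrid nR nC F) a d = (PySem.List.pyRange 0 nC 1).map (fun b => F a b) := by
  unfold pvGrid
  exact PySem.List.pyGetD_map_pyRange_of_nonneg _ nR a d h0 h

theorem pvIte_acc (c : Prop) [Decidable c] (x y : Int) :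
    (if c then x + y else x) = x + (if c then y else 0) := by
  split_ifs <;> simp

theorem pvPadTerm (img : List (List Int)) (nr nc : Int) {u v x y : Int}
    (hx : u = x + 1) (hy : v = y + 1) :
    (if 0 + 1 ≤ u ∧ u < nr + 1 ∧ 0 + 1 ≤ v ∧ v < nc + 1 then
        PySem.List.pyGetD (PySem.List.pyGetD img (u - 1) []) (v - 1) 0
      else 0)
      = (if 0 ≤ x ∧ x < nr ∧ 0 ≤ y ∧ y < nc then
        PySem.List.pyGetD (PySem.List.pyGetD img x []) y 0
      else 0) := by
  have h1 : u - 1 = x := by omega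
  have h2 : v - 1 = y := by omega
  rw [h1, h2]
  exact if_congr (by omega) rfl rfl

theorem pvInner_fold (nR nC r s : Int) (v : Int → Int) (hr0 : 0 ≤ r) (hr : r < nR)
    (hi : Int) :
    ∀ (k : Nat) (lo : Int) (F : Int → Int → Int), (hi - lo).toNat = k → 0 ≤ lo + s →
    (PySem.List.pyRange lo hi 1).foldl (fun P j => pySet2 P r (j + s) (v j)) (pvGrid nR nC F)
      = pvGrid nR nC (fun a b => if a = r ∧ lo + s ≤ b ∧ b < hi + s then v (b - s) else F a b) := by
  intro k
  induction k with
  | zero =>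
    intro lo F hk hlo
    rw [PySem.List.pyRange_one_eq_nil (by omega)]
    simp only [List.foldl_nil]
    apply pvGrid_congr
    intro a b _ _ _ _
    split_ifs with h1 <;> first | rfl | omega
  | succ k ih =>
    intro lo F hk hlo
    rw [PySem.List.pyRange_one_cons (by omega : lo < hi)]
    simp only [List.foldl_cons]
    rw [pvSet2_grid (v lo) hr0 hr hlo]
    rw [ih (lo + 1) _ (by omega) (by omega)]
    apply pvGrid_congr
    intro a b ha0 haR hb0 hbC
    split_ifs <;> first | rfl | omega | (congr 1; omega)

theorem pvOuter_fold (nR nC s t : Int) (w : Int → Int → Int) (clo chi : Int)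
    (hc0 : 0 ≤ clo + s) (hi : Int) (hhi : hi + t ≤ nR) :
    ∀ (k : Nat) (lo : Int) (F : Int → Int → Int), (hi - lo).toNat = k → 0 ≤ lo + t →
    (PySem.List.pyRange lo hi 1).foldl (fun P i =>
        (PySem.List.pyRange clo chi 1).foldl (fun P j => pySet2 P (i + t) (j + s) (w i j)) P)
      (pvGrid nR nC F)
      = pvGrid nR nC (fun a b =>
          if lo + t ≤ a ∧ a < hi + t ∧ clo + s ≤ b ∧ b < chi + s then w (a - t) (b - s) else F a b) := by
  intro k
  induction k with
  | zero =>
    intro lo F hk hlo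
    rw [@PySem.List.pyRange_one_eq_nil lo hi (by omega)]
    simp only [List.foldl_nil]
    apply pvGrid_congr
    intro a b _ _ _ _
    split_ifs with h1 <;> first | rfl | omega
  | succ k ih =>
    intro lo F hk hlo
    rw [PySem.List.pyRange_one_cons (by omega : lo < hi)]
    simp only [List.foldl_cons]
    rw [pvInner_fold nR nC (lo + t) s (w lo) hlo (by omega) chi (chi - clo).toNat clo F rfl hc0]
    rw [ih (lo + 1) _ (by omega) (by omega)]
    apply pvGrid_congr
    intro a b ha0 haR hb0 hbC
    split_ifs <;> first | rfl | omega | (congr 1; omega)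

theorem pvSlice3_sum (f : Int → Int) (m c d : Int) (h0 : 0 ≤ c) (hd : d = c + 3) (h3 : d ≤ m) :
    (PySem.List.slice ((PySem.List.pyRange 0 m 1).map f) (some c) (some d)).sum
      = f c + f (c + 1) + f (c + 2) := by
  subst hd
  rw [PySem.List.slice_toNat _ h0 (by omega)]
  rw [PySem.List.pyRange_one_append 0 c m h0 (by omega)]
  rw [List.map_append]
  have hlen : ((PySem.List.pyRange 0 c 1).map f).length = c.toNat := by
    simp [PySem.List.length_pyRange_one]
  rw [← hlen, List.drop_left]
  have h1 : PySem.List.pyRange c m 1 = c :: (c + 1) :: (c + 2) :: PySem.List.pyRange (c + 3) m 1 := by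
    rw [PySem.List.pyRange_one_cons (by omega : c < m),
        PySem.List.pyRange_one_cons (by omega : c + 1 < m),
        PySem.List.pyRange_one_cons (by omega : c + 1 + 1 < m)]
    norm_num
    constructor
    · ring
    · congr 1; ring
  rw [h1, hlen]
  have h2 : (c + 3).toNat - c.toNat = 3 := by omega
  rw [h2]
  simp [List.take]
  ring

-- ===== VERDICT (by name: the statement is the Claim_ definition above) =====
theorem matrix_smooth_spec : Claim_equal_matrix_smooth := by
  intro img nr nc hdom hpre
  unfold Spec_matrix_smooth
  unfold matrix_smooth
  dsimp only
  simp only [sub_eq_add_neg]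
  rw [show ((PySem.List.pyRange 0 (nr + 2) 1).map
      (fun _ => (PySem.List.pyRange 0 (nc + 2) 1).map (fun _ => (0 : Int))))
      = pvGrid (nr + 2) (nc + 2) (fun _ _ => 0) from rfl]
  rw [pvOuter_fold (nr + 2) (nc + 2) 1 1 (fun i j => PySem.List.pyGetD (PySem.List.pyGetD img i []) j 0)
      0 nc (by omega) nr (by omega) nr.toNat 0 (fun _ _ => 0) (by omega) (by omega)]
  rw [show ((PySem.List.pyRange 0 nr 1).map
      (fun _ => (PySem.List.pyRange 0 nc 1).map (fun _ => (0 : Int))))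
      = pvGrid nr nc (fun _ _ => 0) from rfl]
  rw [pvOuter_fold nr nc (-1) (-1) _ 1 (nc + 1) (by omega) (nr + 1) (by omega)
      nr.toNat 1 (fun _ _ => 0) (by omega) (by omega)]
  unfold matrix_smooth_alt
  dsimp only
  simp only [PySem.List.foldl_append_singleton_eq_map, List.nil_append]
  apply pvGrid_congr
  intro a b ha0 haR hb0 hbC
  rw [if_pos (show (1:Int) + -1 ≤ a ∧ a < nr + 1 + -1 ∧ 1 + -1 ≤ b ∧ b < nc + 1 + -1 from by omega)]
  rw [pvGetD_grid (by omega) (by omega) []]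
  rw [pvGetD_grid (by omega) (by omega) []]
  rw [pvGetD_grid (by omega) (by omega) []]
  rw [pvSlice3_sum _ _ _ _ (by omega) (by omega) (by omega)]
  rw [pvSlice3_sum _ _ _ _ (by omega) (by omega) (by omega)]
  rw [pvSlice3_sum _ _ _ _ (by omega) (by omega) (by omega)]
  simp only [List.foldl_cons, List.foldl_nil]
  simp only [pvIte_acc]
  congr 1
  · rw [pvPadTerm img nr nc (x := a + -1) (y := b + -1) (by omega) (by omega),
        pvPadTerm img nr nc (x := a + -1) (y := b + 0) (by omega) (by omega),
        pvPadTerm img nr nc (x := a + -1) (y := b + 1) (by omega) (by omega),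
        pvPadTerm img nr nc (x := a + 0) (y := b + -1) (by omega) (by omega),
        pvPadTerm img nr nc (x := a + 0) (y := b + 0) (by omega) (by omega),
        pvPadTerm img nr nc (x := a + 0) (y := b + 1) (by omega) (by omega),
        pvPadTerm img nr nc (x := a + 1) (y := b + -1) (by omega) (by omega),
        pvPadTerm img nr nc (x := a + 1) (y := b + 0) (by omega) (by omega),
        pvPadTerm img nr nc (x := a + 1) (y := b + 1) (by omega) (by omega)]
    ring
  · split_ifs <;> omega
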